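-- pv_equiv track=rewrite | github.com/ssafy6-nathan/algorithm-study | study/2022/22.12.06/EJH/1802_종이접기.py | check_can
-- ===== SOURCE A (Python) =====
-- def check_can(p):
--     if len(p) == 1:
--         return True
--     mid = len(p) // 2
--     p1 = p[0: mid]
--     p2 = p[mid + 1:]
--
--     for i in range(mid):
--         if p1[i] == p2[-(i + 1)]:
--             return False
--
--     return check_can(p1) and check_can(p2)
-- ===== SOURCE B (Python) =====
-- # Different algorithm: instead of recursive divide-and-conquer on slices, enumerate
-- # fold centers level by level (half = 1, 2, 4, ...) and test each symmetric pair
-- # directly in the original list by index arithmetic (no slicing, no recursion).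
-- def check_can(p):
--     n = len(p)
--     half = 1
--     while half <= n:
--         for c in range(half, n + 1, 2 * half):
--             for j in range(1, half):
--                 if p[c - j - 1] == p[c + j - 1]:
--                     return False
--         half *= 2
--     return True
-- ===== Notes on version B (the rewrite author's own statement) =====
-- stated objective: alternative
-- what changed: A's recursive divide-and-conquer on list slices is replaced by a non-recursive double loop that enumerates fold centers level by level (half = 1, 2, 4, ...) and tests every symmetric pair in the original list by index arithmetic, with no slicing and no recursion.
-- outside the precondition, e.g. on check_can([1, 2, 3, 1]): A returns False, B raises IndexError; on check_can([5, 6]): A raises IndexError, B raises IndexError; on check_can([]): A raises RecursionError, B returns True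
import Mathlib
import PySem

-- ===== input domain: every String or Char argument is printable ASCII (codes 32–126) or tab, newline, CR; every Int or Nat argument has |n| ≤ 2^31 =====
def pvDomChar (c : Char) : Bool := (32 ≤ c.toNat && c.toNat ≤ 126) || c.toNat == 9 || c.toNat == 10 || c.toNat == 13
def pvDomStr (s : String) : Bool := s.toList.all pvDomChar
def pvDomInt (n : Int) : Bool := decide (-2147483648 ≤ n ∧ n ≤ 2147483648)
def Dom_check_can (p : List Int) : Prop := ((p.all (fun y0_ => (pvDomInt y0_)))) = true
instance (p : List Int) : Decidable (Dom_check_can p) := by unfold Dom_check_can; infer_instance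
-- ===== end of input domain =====

-- B replaces A's recursive divide-and-conquer on slices by a direct double loop that
-- enumerates fold centers level by level and tests each symmetric pair in place by
-- index arithmetic (objective: alternative; return value only — neither mutates p).


-- lemmas the ports' termination proofs cite (p[0:mid] and p[mid+1:] as take/drop)
theorem pv_slice_prefix (p : List Int) (mid : Nat) :
    PySem.List.slice p (some 0) (some (mid : Int)) = p.take mid := by
  rw [PySem.List.slice_zero_start, PySem.List.slice_to_natCast]
theorem pv_slice_suffix (p : List Int) (mid : Nat) :
    PySem.List.slice p (some ((mid : Int) + 1)) none = p.drop (mid + 1) := by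
  have h : ((mid : Int) + 1) = ((mid + 1 : Nat) : Int) := by push_cast; ring
  rw [h, PySem.List.slice_from_natCast]

-- ===== PORT A =====
-- Literal port of A. On p = [] the Python recurses forever (RecursionError); the
-- `p.length = 0` guard only totalizes the port there (outside Pre_). The element
-- comparison is on `Option Int`: inside Pre_ both pyGet? are `some` (Python's int ==).
def check_can (p : List Int) : Bool :=
  if p.length = 1 then true
  else if p.length = 0 then true   -- totalization guard; Python diverges here
  else
    let mid : Nat := p.length / 2
    let p1 := PySem.List.slice p (some 0) (some (mid : Int))
    let p2 := PySem.List.slice p (some ((mid : Int) + 1)) none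
    if (List.range mid).any (fun i =>
        PySem.List.pyGet? p1 (i : Int) == PySem.List.pyGet? p2 (-((i : Int) + 1))) then
      false
    else
      check_can p1 && check_can p2
termination_by p.length
decreasing_by
  · rw [pv_slice_prefix]; simp; omega
  · rw [pv_slice_suffix]; simp; omega

-- ===== PORT B =====
-- The while-loop of Source B, one iteration per call, `half` doubling each time.
-- The `1 ≤ half` conjunct only totalizes the port (Source B starts at half = 1 and
-- doubles it, so half = 0 is unreachable from check_can_alt).
def check_can_loop (p : List Int) (half : Nat) : Bool :=
  if h : 1 ≤ half ∧ half ≤ p.length then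
    if (PySem.List.pyRange (half : Int) ((p.length : Int) + 1) (2 * (half : Int))).any
        (fun c => (PySem.List.pyRange 1 (half : Int) 1).any (fun j =>
          PySem.List.pyGet? p (c - j - 1) == PySem.List.pyGet? p (c + j - 1))) then
      false
    else
      check_can_loop p (2 * half)
  else true
termination_by p.length + 1 - half
decreasing_by omega

def check_can_alt (p : List Int) : Bool := check_can_loop p 1

-- ===== PRECONDITION & SPEC =====
-- Pre_ restricts to the problem's natural domain (Baekjoon 1802: a paper folded k ≥ 1
-- times has 2^k - 1 creases): nonempty lists whose length + 1 is a power of two.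
-- Outside it A diverges on [] and otherwise raises IndexError in some segment unless
-- an early equality returns False first (excluded: both values are reachable only
-- through out-of-spec slicing; see claim cites).
def Pre_check_can (p : List Int) : Prop :=
  p ≠ [] ∧ 2 ^ Nat.log2 (p.length + 1) = p.length + 1
instance (p : List Int) : Decidable (Pre_check_can p) := by unfold Pre_check_can; infer_instance
def pvWitness_check_can : List Int := ([1, 2, 3])
def Spec_check_can (p : List Int) (out : Bool) : Prop := out = check_can_alt p
instance (p : List Int) (out : Bool) : Decidable (Spec_check_can p out) := by unfold Spec_check_can; infer_instance


-- ===== CLAIM (what is proved, stated in full; the proofs are below) =====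
def Claim_equal_check_can : Prop := ∀ (p : List Int), Dom_check_can p → Pre_check_can p → Spec_check_can p (check_can p)

-- ===== LEMMAS AND PROOFS =====
-- The common specification: a "bad" equal pair symmetric about a fold center.
-- pairBad p c j : the pair at 1-based center c, offset j (indices c-j-1 and c+j-1).
def pairBad (p : List Int) (c j : Nat) : Bool := p[c - j - 1]? == p[c + j - 1]?
-- centerBad: some offset 1 ≤ j < half has an equal pair about center c.
def centerBad (p : List Int) (half c : Nat) : Bool :=
  (List.range (half - 1)).any fun j0 => pairBad p c (j0 + 1)
-- levelBad: some center c = half·(2m+1) ≤ p.length at this level is bad.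
def levelBad (p : List Int) (half : Nat) : Bool :=
  (List.range ((p.length + 1) / (2 * half))).any fun m => centerBad p half (half * (2 * m + 1))
-- specBad: some level 2^t, t < K, is bad.
def specBad (p : List Int) (K : Nat) : Bool := (List.range K).any fun t => levelBad p (2 ^ t)

theorem pv_any_range_iff (n : Nat) (f : Nat → Bool) :
    (List.range n).any f = true ↔ ∃ i, i < n ∧ f i = true := by
  simp [List.any_eq_true]

theorem pv_any_range_congr (n : Nat) (f g : Nat → Bool) (h : ∀ i, i < n → f i = g i) :
    (List.range n).any f = (List.range n).any g := by
  rw [Bool.eq_iff_iff, pv_any_range_iff, pv_any_range_iff]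
  constructor
  · rintro ⟨i, hi, hf⟩; exact ⟨i, hi, (h i hi) ▸ hf⟩
  · rintro ⟨i, hi, hg⟩; exact ⟨i, hi, (h i hi).symm ▸ hg⟩

theorem pv_any_range_or (n : Nat) (f g : Nat → Bool) :
    (List.range n).any (fun i => f i || g i) = ((List.range n).any f || (List.range n).any g) := by
  rw [Bool.eq_iff_iff, Bool.or_eq_true, pv_any_range_iff, pv_any_range_iff, pv_any_range_iff]
  constructor
  · rintro ⟨i, hi, h⟩
    have h' : f i = true ∨ g i = true := by
      cases hf : f i <;> cases hg : g i <;> simp_all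
    rcases h' with h | h
    exacts [Or.inl ⟨i, hi, h⟩, Or.inr ⟨i, hi, h⟩]
  · rintro (⟨i, hi, h⟩ | ⟨i, hi, h⟩) <;> exact ⟨i, hi, by simp [h]⟩

theorem pv_level_eq (p : List Int) (k t : Nat) (hlen : p.length + 1 = 2 ^ k) (ht : t < k) :
    ((PySem.List.pyRange ((2 ^ t : Nat) : Int) ((p.length : Int) + 1) (2 * ((2 ^ t : Nat) : Int))).any
      (fun c => (PySem.List.pyRange 1 ((2 ^ t : Nat) : Int) 1).any (fun j =>
        PySem.List.pyGet? p (c - j - 1) == PySem.List.pyGet? p (c + j - 1))))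
    = levelBad p (2 ^ t) := by
  have hH1 : (1:Nat) ≤ 2 ^ t := Nat.one_le_two_pow
  have h2k : (2:Nat) ^ k = 2 * 2 ^ t * 2 ^ (k - t - 1) := by
    have hpp : (2:Nat) * 2 ^ t * 2 ^ (k - t - 1) = 2 ^ (t + 1 + (k - t - 1)) := by
      rw [pow_add, pow_succ]; ring
    rw [hpp]
    congr 1
    omega
  set H : Nat := 2 ^ t with hHdef
  set M : Nat := 2 ^ (k - t - 1) with hMdef
  have hcount : (p.length + 1) / (2 * H) = M := by
    rw [hlen, h2k]
    exact Nat.mul_div_cancel_left M (by omega)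
  have hnM : p.length + 1 = 2 * H * M := by rw [hlen, h2k]
  have hspos : (0:Int) < 2 * ((H : Nat) : Int) := by positivity
  have hHposZ : (0:Int) < (H:Int) := by exact_mod_cast hH1
  rw [Bool.eq_iff_iff]
  unfold levelBad centerBad pairBad
  simp only [List.any_eq_true, List.mem_range, hcount,
    PySem.List.mem_pyRange_iff_of_pos hspos, PySem.List.mem_pyRange_one]
  constructor
  · rintro ⟨c, ⟨hcH, hcn, e, he⟩, j, ⟨hj1, hjH⟩, hpair⟩
    have he0 : 0 ≤ e := by nlinarith
    set m : Nat := e.toNat with hmdef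
    have hme : (m:Int) = e := Int.toNat_of_nonneg he0
    obtain ⟨G, hG⟩ : ∃ G : Nat, H * m = G := ⟨_, rfl⟩
    have hGc : ((G : Nat) : Int) = (H:Int) * (m:Int) := by rw [← hG]; push_cast; ring
    have hxc : c = ((2 * G + H : Nat) : Int) := by
      push_cast
      rw [hGc, hme]
      linarith
    set J : Nat := j.toNat with hJdef
    have hje : (J:Int) = j := Int.toNat_of_nonneg (by omega)
    have hcast : ((p.length : Int) + 1) = 2 * (H:Int) * (M:Int) := by exact_mod_cast hnM
    have hmM : m < M := by
      by_contra hmM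
      have hMm : (M:Int) ≤ (m:Int) := by exact_mod_cast Nat.le_of_not_lt hmM
      have h2 : 2 * (H:Int) * (M:Int) ≤ 2 * (H:Int) * (m:Int) := by nlinarith
      have h3 : c = 2 * ((H:Int) * (m:Int)) + (H:Int) := by rw [hxc]; push_cast; rw [hGc]
      linarith
    refine ⟨m, hmM, J - 1, by omega, ?_⟩
    have hJ1 : J - 1 + 1 = J := by omega
    have hxN : H * (2 * m + 1) = 2 * G + H := by rw [← hG]; ring
    rw [hJ1, hxN]
    have e1 : c - j - 1 = ((2 * G + H - J - 1 : Nat) : Int) := by omega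
    have e2 : c + j - 1 = ((2 * G + H + J - 1 : Nat) : Int) := by omega
    rw [e1, e2, PySem.List.pyGet?_natCast, PySem.List.pyGet?_natCast] at hpair
    exact hpair
  · rintro ⟨m, hm, j0, hj0, hpair⟩
    obtain ⟨G, hG⟩ : ∃ G : Nat, H * m = G := ⟨_, rfl⟩
    obtain ⟨Y, hY⟩ : ∃ Y : Nat, H * M = Y := ⟨_, rfl⟩
    have hGc : ((G : Nat) : Int) = (H:Int) * (m:Int) := by rw [← hG]; push_cast; ring
    have hnY : p.length + 1 = 2 * Y := by rw [← hY, hnM]; ring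
    have hXY : G + H ≤ Y :=
      calc G + H = H * (m + 1) := by rw [← hG]; ring
        _ ≤ H * M := Nat.mul_le_mul_left H (by omega)
        _ = Y := hY
    have hxN : H * (2 * m + 1) = 2 * G + H := by rw [← hG]; ring
    rw [hxN] at hpair
    refine ⟨((2 * G + H : Nat) : Int),
      ⟨by exact_mod_cast Nat.le_add_left H (2 * G), ?_,
        ⟨(m:Int), by push_cast; rw [hGc]; ring⟩⟩,
      ((j0 + 1 : Nat) : Int),
      ⟨by exact_mod_cast Nat.le_add_left 1 j0, by exact_mod_cast (show j0 + 1 < H by omega)⟩, ?_⟩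
    · have hlt : 2 * G + H < p.length + 1 := by omega
      exact_mod_cast hlt
    · have e1 : ((2 * G + H : Nat) : Int) - ((j0 + 1 : Nat) : Int) - 1
          = ((2 * G + H - (j0 + 1) - 1 : Nat) : Int) := by omega
      have e2 : ((2 * G + H : Nat) : Int) + ((j0 + 1 : Nat) : Int) - 1
          = ((2 * G + H + (j0 + 1) - 1 : Nat) : Int) := by omega
      rw [e1, e2, PySem.List.pyGet?_natCast, PySem.List.pyGet?_natCast]
      exact hpair

theorem pv_loop_eq (p : List Int) (k : Nat) (hlen : p.length + 1 = 2 ^ k) :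
    ∀ d t, t + d = k → check_can_loop p (2 ^ t) =
      !((List.range d).any fun u => levelBad p (2 ^ (t + u))) := by
  intro d
  induction d with
  | zero =>
    intro t ht
    have hteq : t = k := by omega
    subst hteq
    rw [check_can_loop, dif_neg]
    · simp
    · have h1 : (1:Nat) ≤ 2 ^ t := Nat.one_le_two_pow
      rintro ⟨-, h2⟩
      omega
  | succ d ih =>
    intro t ht
    have htk : t < k := by omega
    have h1 : (1:Nat) ≤ 2 ^ t := Nat.one_le_two_pow
    have hlt : (2:Nat) ^ t < 2 ^ k := Nat.pow_lt_pow_right (by omega) htk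
    rw [check_can_loop, dif_pos ⟨h1, by omega⟩, pv_level_eq p k t hlen htk]
    cases hbad : levelBad p (2 ^ t) with
    | true =>
      have hany : (List.range (d + 1)).any (fun u => levelBad p (2 ^ (t + u))) = true := by
        rw [pv_any_range_iff]
        exact ⟨0, by omega, by simpa using hbad⟩
      simp [hany]
    | false =>
      have h2 : 2 * 2 ^ t = 2 ^ (t + 1) := by rw [pow_succ]; ring
      simp only [Bool.false_eq_true, if_false]
      rw [h2, ih (t + 1) (by omega)]
      congr 1
      rw [List.range_succ_eq_map, List.any_cons, List.any_map]
      simp only [Nat.add_zero, hbad, Bool.false_or]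
      apply pv_any_range_congr
      intro i _
      have he : t + 1 + i = t + (i + 1) := by omega
      simp [Function.comp, he]

theorem pv_alt_eq_spec (p : List Int) (k : Nat) (hlen : p.length + 1 = 2 ^ k) :
    check_can_alt p = !specBad p k := by
  have h := pv_loop_eq p k hlen k 0 (by omega)
  simpa [check_can_alt, specBad] using h

theorem pv_pairBad_take (p : List Int) (mid c j : Nat) (hj : 1 ≤ j) (hcj : c + j ≤ mid) :
    pairBad (p.take mid) c j = pairBad p c j := by
  unfold pairBad
  rw [List.getElem?_take, List.getElem?_take, if_pos (by omega), if_pos (by omega)]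

theorem pv_pairBad_drop (p : List Int) (s c j : Nat) (hj : j + 1 ≤ c) :
    pairBad (p.drop s) c j = pairBad p (c + s) j := by
  unfold pairBad
  rw [List.getElem?_drop, List.getElem?_drop]
  have e1 : s + (c - j - 1) = c + s - j - 1 := by omega
  have e2 : s + (c + j - 1) = c + s + j - 1 := by omega
  rw [e1, e2]

theorem pv_level_split (p : List Int) (K t : Nat) (hlen : p.length + 1 = 2 ^ (K + 1))
    (ht : t < K) :
    levelBad p (2 ^ t)
      = (levelBad (p.take (2 ^ K - 1)) (2 ^ t) || levelBad (p.drop (2 ^ K)) (2 ^ t)) := by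
  have hH1 : (1:Nat) ≤ 2 ^ t := Nat.one_le_two_pow
  have hQM : (2:Nat) ^ K = 2 * 2 ^ t * 2 ^ (K - t - 1) := by
    have hpp : (2:Nat) * 2 ^ t * 2 ^ (K - t - 1) = 2 ^ (t + 1 + (K - t - 1)) := by
      rw [pow_add, pow_succ]; ring
    rw [hpp]
    congr 1
    omega
  set H : Nat := 2 ^ t with hHdef
  set M : Nat := 2 ^ (K - t - 1) with hMdef
  set Q : Nat := 2 ^ K with hQdef
  have hQ1 : (1:Nat) ≤ Q := Nat.one_le_two_pow
  have hlen2 : p.length + 1 = 2 * Q := by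
    have : (2:Nat) ^ (K + 1) = 2 * Q := by rw [hQdef, pow_succ]; ring
    omega
  have hl1 : (p.take (Q - 1)).length = Q - 1 := by rw [List.length_take]; omega
  have hl2 : (p.drop Q).length = Q - 1 := by rw [List.length_drop]; omega
  have hc0 : (p.length + 1) / (2 * H) = 2 * M := by
    have h1 : p.length + 1 = (2 * H) * (2 * M) := by rw [hlen2, hQM]; ring
    rw [h1]
    exact Nat.mul_div_cancel_left _ (by omega)
  have hc1 : (Q - 1 + 1) / (2 * H) = M := by
    have h1 : Q - 1 + 1 = Q := by omega
    rw [h1, hQM]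
    exact Nat.mul_div_cancel_left M (by omega)
  have hcb1 : ∀ m, m < M →
      centerBad (p.take (Q - 1)) H (H * (2 * m + 1)) = centerBad p H (H * (2 * m + 1)) := by
    intro m hm
    unfold centerBad
    apply pv_any_range_congr
    intro j0 hj0
    apply pv_pairBad_take p (Q - 1) _ _ (by omega)
    have hj0' : j0 + 2 ≤ H := by omega
    have hlt : H * (2 * m + 1) + (j0 + 1) < Q := by
      have h1 : H * (m + 1) ≤ H * M := Nat.mul_le_mul_left H (by omega)
      nlinarith [h1, hj0']
    omega
  have hcb2 : ∀ m, m < M →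
      centerBad (p.drop Q) H (H * (2 * m + 1)) = centerBad p H (H * (2 * (M + m) + 1)) := by
    intro m hm
    unfold centerBad
    apply pv_any_range_congr
    intro j0 hj0
    have hj0' : j0 + 2 ≤ H := by omega
    have hjc : (j0 + 1) + 1 ≤ H * (2 * m + 1) := by nlinarith [hj0', Nat.zero_le (H * m)]
    rw [pv_pairBad_drop p Q _ _ hjc]
    have hcenter : H * (2 * m + 1) + Q = H * (2 * (M + m) + 1) := by rw [hQM]; ring
    rw [hcenter]
  rw [Bool.eq_iff_iff]
  unfold levelBad
  simp only [List.any_eq_true, List.mem_range, hc0, hl1, hl2, hc1, Bool.or_eq_true]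
  constructor
  · rintro ⟨m, hm, hc⟩
    by_cases hmM : m < M
    · left
      exact ⟨m, hmM, by rw [hcb1 m hmM]; exact hc⟩
    · right
      refine ⟨m - M, by omega, ?_⟩
      rw [hcb2 (m - M) (by omega)]
      have hmm : M + (m - M) = m := by omega
      rw [hmm]
      exact hc
  · rintro (⟨m, hm, hc⟩ | ⟨m, hm, hc⟩)
    · exact ⟨m, by omega, by rw [hcb1 m hm] at hc; exact hc⟩
    · refine ⟨M + m, by omega, ?_⟩
      rw [hcb2 m hm] at hc
      exact hc

theorem pv_top_eq (p : List Int) (K : Nat) (hK : 1 ≤ K) (hlen : p.length + 1 = 2 ^ (K + 1)) :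
    ((List.range (2 ^ K - 1)).any fun i =>
        PySem.List.pyGet? (p.take (2 ^ K - 1)) (i : Int)
          == PySem.List.pyGet? (p.drop (2 ^ K)) (-((i : Int) + 1)))
      = levelBad p (2 ^ K) := by
  set Q : Nat := 2 ^ K with hQdef
  have hQ2 : (2:Nat) ≤ Q := by
    calc (2:Nat) = 2 ^ 1 := by norm_num
      _ ≤ 2 ^ K := Nat.pow_le_pow_right (by omega) hK
  have hlen2 : p.length + 1 = 2 * Q := by
    have : (2:Nat) ^ (K + 1) = 2 * Q := by rw [hQdef, pow_succ]; ring
    omega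
  have hl1 : (p.take (Q - 1)).length = Q - 1 := by rw [List.length_take]; omega
  have hl2 : (p.drop Q).length = Q - 1 := by rw [List.length_drop]; omega
  have hcount : (p.length + 1) / (2 * Q) = 1 := by rw [hlen2]; exact Nat.div_self (by omega)
  have hterm : ∀ i, i < Q - 1 →
      (PySem.List.pyGet? (p.take (Q - 1)) (i : Int)
          == PySem.List.pyGet? (p.drop Q) (-((i : Int) + 1)))
        = (p[i]? == p[Q + (Q - 2 - i)]?) := by
    intro i hi
    rw [PySem.List.pyGet?_natCast, List.getElem?_take, if_pos (by omega)]
    have hneg : -((i : Int) + 1) = -(((i + 1 : Nat)) : Int) := by push_cast; ring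
    rw [hneg, PySem.List.pyGet?_neg_natCast _ (i + 1) (by omega) (by rw [hl2]; omega),
      List.getElem?_drop, hl2]
    have e2 : Q + (Q - 1 - (i + 1)) = Q + (Q - 2 - i) := by omega
    rw [e2]
  rw [Bool.eq_iff_iff]
  unfold levelBad centerBad pairBad
  simp only [List.any_eq_true, List.mem_range, hcount]
  constructor
  · rintro ⟨i, hi, hp⟩
    rw [hterm i hi] at hp
    refine ⟨0, by omega, Q - 2 - i, by omega, ?_⟩
    have hc1 : Q * (2 * 0 + 1) = Q := by ring
    rw [hc1]
    have e1 : Q - (Q - 2 - i + 1) - 1 = i := by omega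
    have e2 : Q + (Q - 2 - i + 1) - 1 = Q + (Q - 2 - i) := by omega
    rw [e1, e2]
    exact hp
  · rintro ⟨m, hm, j0, hj0, hp⟩
    have hm0 : m = 0 := by omega
    subst hm0
    have hc1 : Q * (2 * 0 + 1) = Q := by ring
    rw [hc1] at hp
    refine ⟨Q - 2 - j0, by omega, ?_⟩
    rw [hterm (Q - 2 - j0) (by omega)]
    have e1 : Q - (j0 + 1) - 1 = Q - 2 - j0 := by omega
    have e2 : Q + (j0 + 1) - 1 = Q + (Q - 2 - (Q - 2 - j0)) := by omega
    rw [e1, e2] at hp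
    exact hp

theorem pv_A_eq_spec : ∀ (k : Nat) (p : List Int), p.length + 1 = 2 ^ k → 1 ≤ k →
    check_can p = !specBad p k := by
  intro k
  induction k with
  | zero => intro p _ h1; omega
  | succ K ih =>
    intro p hlen hk1
    rcases Nat.eq_zero_or_pos K with hK0 | hKpos
    · subst hK0
      have hl : p.length = 1 := by norm_num at hlen; omega
      rw [check_can, if_pos hl]
      unfold specBad levelBad centerBad
      simp [hl]
    · have h4 : (4:Nat) ≤ 2 ^ (K + 1) := by
        calc (4:Nat) = 2 ^ 2 := by norm_num
          _ ≤ 2 ^ (K + 1) := Nat.pow_le_pow_right (by omega) (by omega)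
      have hQ1 : (1:Nat) ≤ 2 ^ K := Nat.one_le_two_pow
      have hmid : p.length / 2 = 2 ^ K - 1 := by rw [pow_succ] at hlen; omega
      have hmid1 : 2 ^ K - 1 + 1 = 2 ^ K := by omega
      rw [check_can, if_neg (by omega), if_neg (by omega)]
      simp only [hmid, pv_slice_prefix, pv_slice_suffix, hmid1]
      rw [pv_top_eq p K hKpos hlen]
      have hlt : (p.take (2 ^ K - 1)).length + 1 = 2 ^ K := by
        rw [List.length_take]
        rw [pow_succ] at hlen
        omega
      have hld : (p.drop (2 ^ K)).length + 1 = 2 ^ K := by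
        rw [List.length_drop]
        rw [pow_succ] at hlen
        omega
      rw [ih _ hlt hKpos, ih _ hld hKpos]
      have hsplit : specBad p (K + 1)
          = ((specBad (p.take (2 ^ K - 1)) K || specBad (p.drop (2 ^ K)) K)
              || levelBad p (2 ^ K)) := by
        unfold specBad
        rw [List.range_succ, List.any_append]
        congr 1
        · rw [pv_any_range_congr K _ _ (fun t htK => pv_level_split p K t hlen htK),
            pv_any_range_or]
        · simp
      rw [hsplit]
      cases levelBad p (2 ^ K) <;>
        cases specBad (p.take (2 ^ K - 1)) K <;>
        cases specBad (p.drop (2 ^ K)) K <;> simp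

-- ===== VERDICT (by name: the statement is the Claim_ definition above) =====
theorem check_can_spec : Claim_equal_check_can := by
  intro p _ hpre
  obtain ⟨hne, hpow⟩ := hpre
  have hlen : p.length + 1 = 2 ^ (Nat.log2 (p.length + 1)) := hpow.symm
  have hk : 1 ≤ Nat.log2 (p.length + 1) := by
    rcases Nat.eq_zero_or_pos (Nat.log2 (p.length + 1)) with h0 | h1
    · exfalso
      rw [h0, pow_zero] at hlen
      have hz : p.length = 0 := by omega
      exact hne (List.eq_nil_of_length_eq_zero hz)
    · exact h1
  unfold Spec_check_can
  rw [pv_A_eq_spec _ p hlen hk, pv_alt_eq_spec p _ hlen]
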